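-- pv_equiv track=rewrite | github.com/sueszli/vector-database-benchmark | dataset/python-mutated/filterbank.py | _split_taps
-- ===== SOURCE A (Python) =====
-- def _split_taps(taps, mpoints):
--     if False:
--         while True:
--             i = 10
--     assert len(taps) % mpoints == 0
--     result = [list() for x in range(mpoints)]
--     for i in range(len(taps)):
--         result[i % mpoints].append(taps[i])
--     return [tuple(x) for x in result]
-- ===== SOURCE B (Python) =====
-- def _split_taps(taps, mpoints):
--     assert len(taps) % mpoints == 0
--     return [tuple(taps[j::mpoints]) for j in range(mpoints)]
-- ===== Notes on version B (the rewrite author's own statement) =====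
-- stated objective: idiomatic
-- what changed: Replaced the modulo-dispatching index loop (build mpoints empty buckets, append taps[i] to bucket i % mpoints) by a direct comprehension of strided slices taps[j::mpoints], one per group.
import Mathlib
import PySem

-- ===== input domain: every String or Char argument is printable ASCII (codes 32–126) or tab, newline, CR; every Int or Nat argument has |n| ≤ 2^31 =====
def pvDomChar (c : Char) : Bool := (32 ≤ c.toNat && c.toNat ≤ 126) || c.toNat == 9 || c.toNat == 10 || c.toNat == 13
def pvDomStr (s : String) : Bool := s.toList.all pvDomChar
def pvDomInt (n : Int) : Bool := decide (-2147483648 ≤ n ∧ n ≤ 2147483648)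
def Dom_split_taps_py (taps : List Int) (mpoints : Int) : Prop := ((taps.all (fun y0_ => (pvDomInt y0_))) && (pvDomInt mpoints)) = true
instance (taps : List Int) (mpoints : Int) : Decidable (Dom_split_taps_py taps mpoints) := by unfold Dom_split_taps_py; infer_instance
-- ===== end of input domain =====

-- B deinterleaves with one strided slice taps[j::mpoints] per group instead of A's modulo-dispatching append loop; return values proved equal on Pre_.

-- ===== PORT A =====
-- result[i % mpoints].append(taps[i]) is modelled as read-modify-write of the group list;
-- [tuple(x) for x in result] maps each group to itself (a tuple of ints is a List Int here).
def split_taps_py (taps : List Int) (mpoints : Int) : List (List Int) :=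
  ((PySem.List.pyRange 0 (taps.length : Int) 1).foldl
      (fun res i =>
        PySem.List.pySetD res (PySem.Int.mod i mpoints)
          (PySem.List.pyGetD res (PySem.Int.mod i mpoints) [] ++ [PySem.List.pyGetD taps i 0]))
      ((PySem.List.pyRange 0 mpoints 1).map (fun _ => []))).map (fun x => x)

-- ===== PORT B =====
-- [tuple(taps[j::mpoints]) for j in range(mpoints)]; slice? is none only for step 0, which
-- never occurs for j drawn from a nonempty range(mpoints), so the .getD [] default is exact.
def split_taps_py_alt (taps : List Int) (mpoints : Int) : List (List Int) :=
  (PySem.List.pyRange 0 mpoints 1).map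
    (fun j => (PySem.List.slice? taps (some j) none mpoints).getD [])

-- ===== PRECONDITION & SPEC =====
-- Exactly the inputs on which A returns: mpoints ≠ 0 (else len(taps) % mpoints raises
-- ZeroDivisionError), len(taps) % mpoints == 0 (else the assert raises AssertionError), and
-- for negative mpoints only empty taps (else result is empty and result[i % mpoints] raises IndexError).
def Pre_split_taps_py (taps : List Int) (mpoints : Int) : Prop :=
  mpoints ≠ 0 ∧ PySem.Int.mod (taps.length : Int) mpoints = 0 ∧ (mpoints < 0 → taps = [])
instance (taps : List Int) (mpoints : Int) : Decidable (Pre_split_taps_py taps mpoints) := by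
  unfold Pre_split_taps_py; infer_instance
def pvWitness_split_taps_py : List Int × Int := ([1, 2, 3, 4, 5, 6], 2)

def Spec_split_taps_py (taps : List Int) (mpoints : Int) (out : List (List Int)) : Prop := out = split_taps_py_alt taps mpoints
instance (taps : List Int) (mpoints : Int) (out : List (List Int)) : Decidable (Spec_split_taps_py taps mpoints out) := by unfold Spec_split_taps_py; infer_instance

-- ===== CLAIM (what is proved, stated in full; the proofs are below) =====
def Claim_equal_split_taps_py : Prop := ∀ (taps : List Int) (mpoints : Int), Dom_split_taps_py taps mpoints → Pre_split_taps_py taps mpoints → Spec_split_taps_py taps mpoints (split_taps_py taps mpoints)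

-- ===== LEMMAS AND PROOFS =====

lemma pvArith (m j n : Nat) (hm : 0 < m) (hj : j < m) :
    (n + 1 - j + m - 1) / m = (n - j + m - 1) / m + (if n % m = j then 1 else 0) := by
  rcases Nat.lt_or_ge n j with h | h
  · have h3 : n % m ≠ j := by have := Nat.mod_le n m; omega
    rw [Nat.div_eq_of_lt (by omega), Nat.div_eq_of_lt (by omega), if_neg h3]
  · have hnum : n + 1 - j + m - 1 = (n - j + m) := by omega
    have hnum2 : n - j + m = (n - j + m - 1) + 1 := by omega
    rw [hnum, hnum2, Nat.succ_div, ← hnum2]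
    have key : m ∣ n - j ↔ n % m = j := by
      rw [← Nat.modEq_iff_dvd' h]
      unfold Nat.ModEq
      rw [Nat.mod_eq_of_lt hj]
      exact ⟨fun h => h.symm, fun h => h.symm⟩
    simp [Nat.dvd_add_self_right, key]

lemma pvFilter_strided (m j : Nat) (hm : 0 < m) (hj : j < m) (n : Nat) :
    (List.range n).filter (fun i => i % m = j)
      = (List.range ((n - j + m - 1) / m)).map (fun k => j + m * k) := by
  induction n with
  | zero => rw [Nat.div_eq_of_lt (by omega)]; simp
  | succ n ih =>
    rw [List.range_succ, List.filter_append, ih, pvArith m j n hm hj]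
    by_cases h : n % m = j
    · have hq := Nat.div_add_mod n m
      rw [h] at hq
      set q := n / m with hqdef
      have h1 : n - j + m - 1 = m * q + (m - 1) := by omega
      have hc : (n - j + m - 1) / m = q := by
        rw [h1, Nat.mul_add_div hm, Nat.div_eq_of_lt (by omega)]
        omega
      have hn : j + m * q = n := by omega
      rw [if_pos h, hc, List.range_succ, List.map_append]
      simp [h, hn]
    · rw [if_neg h]
      simp [h]

lemma pvSlice_strided (taps : List Int) (m j : Nat) (hm : 0 < m) :
    PySem.List.slice? taps (some (j : Int)) none (m : Int)
      = some ((List.range ((taps.length - j + m - 1) / m)).map (fun k => taps.getD (j + m * k) 0)) := by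
  have hm0 : ¬ ((m : Int) = 0) := by exact_mod_cast hm.ne'
  have hmneg : ¬ ((m : Int) < 0) := by omega
  have hj0 : ¬ ((j : Int) < 0) := by omega
  simp only [PySem.List.slice?, PySem.List.sliceIndices, if_neg hm0, if_neg hmneg, if_neg hj0,
    if_pos (show (0:Int) < (m:Int) by exact_mod_cast hm)]
  rcases Nat.lt_or_ge j taps.length with hlt | hge
  · have hmin : min (j : Int) (taps.length : Int) = (j : Int) := by omega
    rw [hmin, if_pos (by exact_mod_cast hlt)]
    have hcnt : (((taps.length : Int) - (j : Int) + (m : Int) - 1) / (m : Int)).toNat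
        = (taps.length - j + m - 1) / m := by
      rw [show ((taps.length : Int) - (j : Int) + (m : Int) - 1) = ((taps.length - j + m - 1 : Nat) : Int) by omega,
        ← Int.natCast_div, Int.toNat_natCast]
    rw [hcnt]
    congr 1
    have hptw : ∀ k ∈ List.range ((taps.length - j + m - 1) / m),
        taps[((j : Int) + (m : Int) * (k : Int)).toNat]?
          = some (taps.getD (j + m * k) 0) := by
      intro k hk
      rw [List.mem_range] at hk
      have hcm : m * ((taps.length - j + m - 1) / m) ≤ taps.length - j + m - 1 := by
        rw [mul_comm]; exact Nat.div_mul_le_self _ _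
      have hstep : m * (k + 1) ≤ m * ((taps.length - j + m - 1) / m) :=
        Nat.mul_le_mul_left m hk
      rw [Nat.mul_succ] at hstep
      have hidx : j + m * k < taps.length := by omega
      rw [show ((j : Int) + (m : Int) * (k : Int)) = ((j + m * k : Nat) : Int) by push_cast; ring,
        Int.toNat_natCast, List.getElem?_eq_getElem hidx, List.getD_eq_getElem taps 0 hidx]
    exact (List.filterMap_congr hptw).trans (by exact congrFun List.filterMap_eq_map _)
  · have hmin : min (j : Int) (taps.length : Int) = (taps.length : Int) := by omega
    rw [hmin, if_neg (lt_irrefl _)]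
    rw [show taps.length - j + m - 1 = m - 1 by omega, Nat.div_eq_of_lt (by omega)]
    simp

lemma pvSlice_eq_group (taps : List Int) (m j : Nat) (hm : 0 < m) (hj : j < m) :
    (PySem.List.slice? taps (some (j : Int)) none (m : Int)).getD []
      = ((List.range taps.length).filter (fun i => i % m = j)).map (fun i => taps.getD i 0) := by
  rw [pvSlice_strided taps m j hm, Option.getD_some, pvFilter_strided m j hm hj, List.map_map]
  rfl

lemma pvFold_invariant (taps : List Int) (m : Nat) (hm : 0 < m) (k : Nat) :
    (PySem.List.pyRange 0 (k : Int) 1).foldl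
      (fun res i =>
        PySem.List.pySetD res (PySem.Int.mod i (m : Int))
          (PySem.List.pyGetD res (PySem.Int.mod i (m : Int)) [] ++ [PySem.List.pyGetD taps i 0]))
      ((List.range m).map (fun _ => ([] : List Int)))
    = (List.range m).map (fun j =>
        ((List.range k).filter (fun i => i % m = j)).map (fun i => taps.getD i 0)) := by
  induction k with
  | zero =>
    rw [show ((0 : Nat) : Int) = 0 from rfl, PySem.List.pyRange_one_eq_nil le_rfl]
    simp
  | succ k ih =>
    rw [show ((k + 1 : Nat) : Int) = (k : Int) + 1 by push_cast; ring,
      PySem.List.pyRange_one_succ_right (Int.natCast_nonneg k), List.foldl_append, ih]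
    simp only [List.foldl_cons, List.foldl_nil, PySem.Int.mod_natCast,
      PySem.List.pyGetD_natCast, PySem.List.pySetD_natCast]
    rw [PySem.List.getD_map_range _ m (k % m) [] (Nat.mod_lt k hm)]
    apply List.ext_getElem
    · simp
    · intro idx h1 h2
      simp only [List.getElem_set, List.getElem_map, List.getElem_range,
        List.length_set, List.length_map, List.length_range] at h1 h2 ⊢
      by_cases hcase : k % m = idx
      · rw [if_pos hcase, List.range_succ, List.filter_append, List.map_append]
        simp [hcase]
      · rw [if_neg hcase, List.range_succ, List.filter_append]
        simp [hcase]


-- ===== VERDICT (by name: the statement is the Claim_ definition above) =====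
theorem split_taps_py_spec : Claim_equal_split_taps_py := by
  intro taps mpoints _dom hpre
  obtain ⟨h0, hmod, hneg⟩ := hpre
  unfold Spec_split_taps_py
  rcases lt_trichotomy mpoints 0 with hn | hz | hpos
  · have ht : taps = [] := hneg hn
    subst ht
    simp [split_taps_py, split_taps_py_alt,
      PySem.List.pyRange_one_eq_nil (show mpoints ≤ 0 by omega)]
  · exact absurd hz h0
  · obtain ⟨m, rfl⟩ : ∃ m : Nat, mpoints = (m : Int) := ⟨mpoints.toNat, by omega⟩
    have hm : 0 < m := by exact_mod_cast hpos
    unfold split_taps_py split_taps_py_alt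
    rw [PySem.List.pyRange_zero_nat m, List.map_map, List.map_map]
    rw [show ((fun _ => ([] : List Int)) ∘ (fun k : Nat => (k : Int))) = (fun _ => ([] : List Int)) from rfl]
    rw [pvFold_invariant taps m hm taps.length]
    rw [List.map_map]
    apply List.map_congr_left
    intro j hj
    rw [List.mem_range] at hj
    show _ = (PySem.List.slice? taps (some ((j : Nat) : Int)) none ((m : Nat) : Int)).getD []
    rw [pvSlice_eq_group taps m j hm hj]
    rfl
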